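-- pv_equiv track=rewrite | github.com/LuisGalvez-foc/Ejercicios_py | OrdenaPositivos.py | OrdenaPositivos
-- ===== SOURCE A (Python) =====
-- def OrdenaPositivos(lista_numeros):
--     '''Ordena los números positivos de menor a mayor y deja los negativos en su posición original'''
--     lista_positivos = sorted([num for num in lista_numeros if num > 0])
--     lista_final = []
--     pos = 0
--
--     for num in lista_numeros:
--         if num > 0:
--             lista_final.append(lista_positivos[pos])
--             pos += 1
--         else:
--             lista_final.append(num)
--
--     return lista_final
-- ===== SOURCE B (Python) =====
-- def OrdenaPositivos(lista_numeros):
--     '''Min-extraction (selection) scheme: no sort anywhere; each time a positive slot is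
--     reached, extract the current minimum of the remaining positives and emit it.'''
--     pendientes = [x for x in lista_numeros if x > 0]
--     resultado = []
--     for x in lista_numeros:
--         if x > 0:
--             m = min(pendientes)
--             pendientes.remove(m)
--             resultado.append(m)
--         else:
--             resultado.append(x)
--     return resultado
-- ===== Notes on version B (the rewrite author's own statement) =====
-- stated objective: alternative
-- what changed: Drops the sort entirely: B keeps the unsorted positives as a work pool and, at each positive slot, extracts the current minimum with min()+remove() (repeated selection, O(n^2)), instead of A's sorted() list consumed by a running cursor.
import Mathlib
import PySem

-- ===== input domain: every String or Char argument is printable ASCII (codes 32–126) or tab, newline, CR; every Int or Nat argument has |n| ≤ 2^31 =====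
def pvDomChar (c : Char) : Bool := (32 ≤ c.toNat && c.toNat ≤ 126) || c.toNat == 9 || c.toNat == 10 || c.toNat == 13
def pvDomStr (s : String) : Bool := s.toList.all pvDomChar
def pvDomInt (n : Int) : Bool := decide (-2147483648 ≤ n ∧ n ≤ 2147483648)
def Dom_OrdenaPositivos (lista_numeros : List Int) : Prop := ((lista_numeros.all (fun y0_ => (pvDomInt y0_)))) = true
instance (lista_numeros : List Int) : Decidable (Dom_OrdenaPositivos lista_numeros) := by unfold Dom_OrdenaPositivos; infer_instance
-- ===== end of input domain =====

-- B replaces A's sort-then-place-with-a-cursor by repeated minimum EXTRACTION: it keeps the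
-- unsorted positives as a work pool and, at each positive slot, takes min() out of the pool
-- (no sort anywhere); objective: alternative (B is O(n^2), not faster).

-- ===== PORT A =====
-- the cursor `pos` always stays in range of lista_positivos, so the pyGetD default is never used
def OrdenaPositivos (lista_numeros : List Int) : List Int :=
  let lista_positivos := PySem.List.sorted (lista_numeros.filter (fun num => num > 0)) (fun x => x) false
  (lista_numeros.foldl
    (fun (st : List Int × Nat) num =>
      if num > 0 then (st.1 ++ [PySem.List.pyGetD lista_positivos (st.2 : Int) 0], st.2 + 1)
      else (st.1 ++ [num], st.2))
    ([], 0)).1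

-- ===== PORT B =====
-- the pool `pendientes` is nonempty at every positive slot, so the getD defaults are never used
def OrdenaPositivos_alt (lista_numeros : List Int) : List Int :=
  let pendientes := lista_numeros.filter (fun x => x > 0)
  (lista_numeros.foldl
    (fun (st : List Int × List Int) x =>
      if x > 0 then
        let m := (PySem.List.min? st.2 (fun y => y)).getD 0
        (st.1 ++ [m], (PySem.List.remove? st.2 m).getD st.2)
      else (st.1 ++ [x], st.2))
    ([], pendientes)).1

-- ===== PRECONDITION & SPEC =====
def Spec_OrdenaPositivos (lista_numeros : List Int) (out : List Int) : Prop := out = OrdenaPositivos_alt lista_numeros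
instance (lista_numeros : List Int) (out : List Int) : Decidable (Spec_OrdenaPositivos lista_numeros out) := by unfold Spec_OrdenaPositivos; infer_instance

-- ===== CLAIM (what is proved, stated in full; the proofs are below) =====
def Claim_equal_OrdenaPositivos : Prop := ∀ (lista_numeros : List Int), Dom_OrdenaPositivos lista_numeros → Spec_OrdenaPositivos lista_numeros (OrdenaPositivos lista_numeros)

-- ===== LEMMAS AND PROOFS =====

/-- The common intermediate result: positives replaced in order by the supply `ps`. -/
def merge : List Int → List Int → List Int
  | [], _ => []
  | x :: xs, ps => if x > 0 then ps.headD 0 :: merge xs ps.tail else x :: merge xs ps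

/-- Extracting the minimum of a nonempty list is peeling the head of its sorted version. -/
theorem sorted_cons_min (q : List Int) (m : Int)
    (hm : PySem.List.min? q (fun y => y) = some m) :
    PySem.List.sorted q (fun x => x) false = m :: PySem.List.sorted (q.erase m) (fun x => x) false := by
  have hmem : m ∈ q := PySem.List.min?_mem hm
  have hmin : ∀ y ∈ q, m ≤ y := fun y hy => PySem.List.min?_isMin hm y hy
  apply PySem.List.sorted_id_eq_of_perm_of_pairwise
  · exact ((PySem.List.sorted_perm _ _ _).cons m).trans (List.perm_cons_erase hmem).symm
  · refine List.pairwise_cons.mpr ⟨?_, ?_⟩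
    · intro y hy
      exact hmin y (List.mem_of_mem_erase (by rwa [PySem.List.mem_sorted] at hy))
    · exact PySem.List.sorted_pairwise _ _

/-- A's loop: a cursor walking down the sorted supply computes `merge`. -/
theorem A_fold (ps : List Int) (l : List Int) (acc : List Int) (p : Nat) :
    (l.foldl
      (fun (st : List Int × Nat) num =>
        if num > 0 then (st.1 ++ [PySem.List.pyGetD ps (st.2 : Int) 0], st.2 + 1)
        else (st.1 ++ [num], st.2))
      (acc, p)).1 = acc ++ merge l (ps.drop p) := by
  induction l generalizing acc p with
  | nil => simp [merge]
  | cons x xs ih =>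
      by_cases hx : x > 0
      · simp only [List.foldl_cons, hx, if_pos]
        rw [ih]
        have h1 : (ps.drop p).headD 0 = ps.getD p 0 := by
          simp [List.headD_eq_head?_getD, List.head?_drop, List.getD_eq_getElem?_getD]
        have h2 : (ps.drop p).tail = ps.drop (p + 1) := List.tail_drop
        rw [merge, if_pos hx, h1, h2]
        simp [PySem.List.pyGetD_natCast]
      · simp only [List.foldl_cons, hx, if_neg, not_false_iff]
        rw [ih]
        simp [merge, hx]

/-- B's loop: repeated min-extraction from the pool `q` computes `merge` against `sorted q`. -/
theorem B_fold (l : List Int) (q : List Int) (acc : List Int)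
    (hlen : (l.filter (fun x => x > 0)).length ≤ q.length) :
    (l.foldl
      (fun (st : List Int × List Int) x =>
        if x > 0 then
          let m := (PySem.List.min? st.2 (fun y => y)).getD 0
          (st.1 ++ [m], (PySem.List.remove? st.2 m).getD st.2)
        else (st.1 ++ [x], st.2))
      (acc, q)).1 = acc ++ merge l (PySem.List.sorted q (fun x => x) false) := by
  induction l generalizing q acc with
  | nil => simp [merge]
  | cons x xs ih =>
      by_cases hx : x > 0
      · have hcnt : (xs.filter (fun x => x > 0)).length + 1 ≤ q.length := by
          simpa [List.filter_cons, hx] using hlen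
        have hq : q ≠ [] := by
          intro h; subst h; simp at hcnt
        obtain ⟨m, hm⟩ : ∃ m, PySem.List.min? q (fun y => y) = some m := by
          cases hmq : PySem.List.min? q (fun y => y) with
          | none => rw [PySem.List.min?_eq_none_iff] at hmq; exact absurd hmq hq
          | some m => exact ⟨m, rfl⟩
        have hmem : m ∈ q := PySem.List.min?_mem hm
        have hrem : (PySem.List.remove? q m).getD q = q.erase m := by
          rw [PySem.List.remove?_eq_some_erase q m hmem]; rfl
        simp only [List.foldl_cons, hx, if_pos, hm, Option.getD_some, hrem]
        rw [ih (q.erase m) _ (by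
          have := q.length_erase_of_mem hmem
          omega)]
        rw [sorted_cons_min q m hm, merge, if_pos hx]
        simp
      · simp only [List.foldl_cons, hx, if_neg, not_false_iff]
        rw [ih q _ (by simpa [List.filter_cons, hx] using hlen)]
        rw [merge, if_neg hx]
        simp

-- ===== VERDICT (by name: the statement is the Claim_ definition above) =====
theorem OrdenaPositivos_spec : Claim_equal_OrdenaPositivos := by
  intro l _
  show OrdenaPositivos l = OrdenaPositivos_alt l
  have hA : OrdenaPositivos l
      = merge l (PySem.List.sorted (l.filter (fun num => num > 0)) (fun x => x) false) := by
    show (l.foldl _ (([] : List Int), 0)).1 = _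
    rw [A_fold]
    simp
  have hB : OrdenaPositivos_alt l
      = merge l (PySem.List.sorted (l.filter (fun x => x > 0)) (fun x => x) false) := by
    show (l.foldl _ (([] : List Int), l.filter (fun x => x > 0))).1 = _
    rw [B_fold l (l.filter (fun x => x > 0)) [] (le_refl _)]
    simp
  rw [hA, hB]
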